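-- pv_equiv track=rewrite | github.com/vasilije2703/programskiJezici | zadaci/rok1.py | izbaci_parne_cifre
-- ===== SOURCE A (Python) =====
-- def izbaci_parne_cifre(n):
--     lista = []
--     listap = []
--     while n > 0:
--         lista.append(n % 10)
--         if (n % 10) % 2 == 0:
--             listap.append(n % 10)
--
--         n = n // 10
--
--     for broj in listap:
--         lista.remove(broj)
--
--
--
--     k = 0
--     broj = 0
--     for br in lista:
--         broj += br*(10**k)
--         k += 1
--
--     return broj
-- ===== SOURCE B (Python) =====
-- def izbaci_parne_cifre(n):
--     # Single recursive pass over the digits: no lists, no .remove, no 10**k.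
--     if n <= 0:
--         return 0
--     d = n % 10
--     rest = izbaci_parne_cifre(n // 10)
--     return rest * 10 + d if d % 2 == 1 else rest
-- ===== Notes on version B (the rewrite author's own statement) =====
-- stated objective: simpler
-- what changed: Replaces A's three-phase list pipeline (collect all digits and the even digits, delete evens by value with list.remove, rebuild with a power-of-ten counter) by one direct recursion on n that keeps an odd digit below the digits already kept and skips an even one.
import Mathlib
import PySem

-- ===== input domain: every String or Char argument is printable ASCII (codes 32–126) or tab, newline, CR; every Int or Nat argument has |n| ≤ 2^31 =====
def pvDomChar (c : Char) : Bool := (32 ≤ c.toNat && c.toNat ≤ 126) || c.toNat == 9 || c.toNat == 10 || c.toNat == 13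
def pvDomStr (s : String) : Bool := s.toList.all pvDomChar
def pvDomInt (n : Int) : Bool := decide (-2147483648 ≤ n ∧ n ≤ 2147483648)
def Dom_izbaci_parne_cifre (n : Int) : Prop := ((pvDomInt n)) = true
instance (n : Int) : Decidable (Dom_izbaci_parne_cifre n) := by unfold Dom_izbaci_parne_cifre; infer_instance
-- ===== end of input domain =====

-- B replaces A's three list passes (collect digits, delete evens via list.remove, rebuild
-- with a power-of-10 counter) by one direct recursion on n; objective: simpler.

-- termination helper cited by the ports' decreasing_by (n // 10 shrinks for positive n)
theorem pvFloordiv10_lt (n : Int) (h : 0 < n) :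
    (PySem.Int.floordiv n 10).toNat < n.toNat := by
  rw [PySem.Int.floordiv_eq_ediv_of_pos (by norm_num)]
  omega

-- ===== PORT A =====
-- the `while n > 0` loop: appends n % 10 to lista, and to listap when even
def pvDigitsLoop (n : Int) (lista listap : List Int) : List Int × List Int :=
  if h : 0 < n then
    let d := PySem.Int.mod n 10
    pvDigitsLoop (PySem.Int.floordiv n 10)
      (lista ++ [d])
      (if PySem.Int.mod d 2 = 0 then listap ++ [d] else listap)
  else (lista, listap)
termination_by n.toNat
decreasing_by exact pvFloordiv10_lt n h

def izbaci_parne_cifre (n : Int) : Int :=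
  let p := pvDigitsLoop n [] []
  -- `lista.remove(broj)`: Python would raise ValueError were broj absent, which never
  -- happens here (every element of listap occurs in lista); the .getD fallback is unreachable.
  let lista := p.2.foldl (fun l broj => (PySem.List.remove? l broj).getD l) p.1
  -- `broj += br*(10**k); k += 1` (k is a nonnegative counter, ported as Nat for 10 ** k)
  (lista.foldl (fun (kb : Nat × Int) br => (kb.1 + 1, kb.2 + br * 10 ^ kb.1)) (0, 0)).2

-- ===== PORT B =====
def izbaci_parne_cifre_alt (n : Int) : Int :=
  if h : n ≤ 0 then 0
  else
    let d := PySem.Int.mod n 10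
    let rest := izbaci_parne_cifre_alt (PySem.Int.floordiv n 10)
    if PySem.Int.mod d 2 = 1 then rest * 10 + d else rest
termination_by n.toNat
decreasing_by exact pvFloordiv10_lt n (by omega)

-- ===== PRECONDITION & SPEC =====
def Spec_izbaci_parne_cifre (n : Int) (out : Int) : Prop := out = izbaci_parne_cifre_alt n
instance (n : Int) (out : Int) : Decidable (Spec_izbaci_parne_cifre n out) := by unfold Spec_izbaci_parne_cifre; infer_instance

-- ===== CLAIM (what is proved, stated in full; the proofs are below) =====
def Claim_equal_izbaci_parne_cifre : Prop := ∀ (n : Int), Dom_izbaci_parne_cifre n → Spec_izbaci_parne_cifre n (izbaci_parne_cifre n)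

-- ===== LEMMAS AND PROOFS =====

-- the least-significant-first digit list of n (empty for n ≤ 0)
def pvD (n : Int) : List Int :=
  if h : 0 < n then PySem.Int.mod n 10 :: pvD (PySem.Int.floordiv n 10) else []
termination_by n.toNat
decreasing_by exact pvFloordiv10_lt n h

-- value of a least-significant-first digit list
def pvEval : List Int → Int
  | [] => 0
  | d :: t => d + 10 * pvEval t

theorem pvDigitsLoop_eq_aux : ∀ (m : Nat) (n : Int), n.toNat ≤ m → ∀ lista listap,
    pvDigitsLoop n lista listap =
      (lista ++ pvD n, listap ++ (pvD n).filter (fun d => decide (PySem.Int.mod d 2 = 0))) := by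
  intro m
  induction m with
  | zero =>
    intro n hm lista listap
    have h : ¬ 0 < n := by omega
    rw [pvDigitsLoop, pvD, dif_neg h, dif_neg h]
    simp
  | succ m ih =>
    intro n hm lista listap
    by_cases h : 0 < n
    · rw [pvDigitsLoop, pvD, dif_pos h, dif_pos h]
      have hlt := pvFloordiv10_lt n h
      rw [ih (PySem.Int.floordiv n 10) (by omega)]
      by_cases he : PySem.Int.mod (PySem.Int.mod n 10) 2 = 0
      · simp only [he, if_pos, List.filter_cons, decide_true,
          List.append_assoc, List.singleton_append]
      · simp only [he, if_neg, List.filter_cons, decide_false, Bool.false_eq_true,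
          List.append_assoc, List.singleton_append, not_false_eq_true]
    · rw [pvDigitsLoop, pvD, dif_neg h, dif_neg h]
      simp

theorem pvDigitsLoop_eq (n : Int) (lista listap : List Int) :
    pvDigitsLoop n lista listap =
      (lista ++ pvD n, listap ++ (pvD n).filter (fun d => decide (PySem.Int.mod d 2 = 0))) :=
  pvDigitsLoop_eq_aux n.toNat n (le_refl _) lista listap

theorem pvRemove?_cons_of_ne {a v : Int} (t : List Int) (h : a ≠ v) :
    PySem.List.remove? (a :: t) v = Option.map (a :: ·) (PySem.List.remove? t v) := by
  simp only [PySem.List.remove?, List.idxOf?_cons]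
  have hv : (a == v) = false := by simp [h]
  simp only [hv, Bool.false_eq_true, if_false]
  cases List.idxOf? v t <;> simp [List.eraseIdx]

theorem pvFold_remove_skip (P : Int → Bool) (a : Int) (ha : P a = false) :
    ∀ (vs t : List Int), (∀ v ∈ vs, P v = true) →
    vs.foldl (fun l broj => (PySem.List.remove? l broj).getD l) (a :: t)
      = a :: vs.foldl (fun l broj => (PySem.List.remove? l broj).getD l) t := by
  intro vs
  induction vs with
  | nil => intro t _; rfl
  | cons v vs ih =>
    intro t hall
    have hne : a ≠ v := by
      intro he; rw [he] at ha
      have := hall v (by simp)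
      rw [this] at ha; cases ha
    simp only [List.foldl_cons]
    rw [pvRemove?_cons_of_ne t hne]
    have hrec : (Option.map (a :: ·) (PySem.List.remove? t v)).getD (a :: t)
        = a :: (PySem.List.remove? t v).getD t := by
      cases PySem.List.remove? t v <;> rfl
    rw [hrec, ih _ (fun w hw => hall w (by simp [hw]))]

theorem pvRemoveAll (P : Int → Bool) : ∀ (l : List Int),
    (l.filter P).foldl (fun l broj => (PySem.List.remove? l broj).getD l) l
      = l.filter (fun x => !P x) := by
  intro l
  induction l with
  | nil => rfl
  | cons a t ih =>
    by_cases ha : P a = true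
    · have : PySem.List.remove? (a :: t) a = some t := by
        simp [PySem.List.remove?, List.idxOf?_cons, List.eraseIdx]
      simp only [List.filter_cons, ha, if_pos, List.foldl_cons, this, Option.getD_some]
      simpa [ha] using ih
    · have ha' : P a = false := by simpa using ha
      rw [List.filter_cons_of_neg (by simp [ha'])]
      rw [pvFold_remove_skip P a ha' _ t (fun v hv => (List.mem_filter.mp hv).2)]
      simp [ha', ih]

theorem pvFold_eval : ∀ (l : List Int) (k : Nat) (b : Int),
    (l.foldl (fun (kb : Nat × Int) br => (kb.1 + 1, kb.2 + br * 10 ^ kb.1)) (k, b)).2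
      = b + 10 ^ k * pvEval l := by
  intro l
  induction l with
  | nil => intro k b; simp [pvEval]
  | cons d t ih =>
    intro k b
    simp only [List.foldl_cons, pvEval, ih]
    ring

theorem pvEval_filter_odd_aux : ∀ (m : Nat) (n : Int), n.toNat ≤ m →
    pvEval ((pvD n).filter (fun x => !decide (PySem.Int.mod x 2 = 0)))
      = izbaci_parne_cifre_alt n := by
  intro m
  induction m with
  | zero =>
    intro n hm
    have h : ¬ 0 < n := by omega
    rw [pvD, izbaci_parne_cifre_alt, dif_neg h, dif_pos (by omega : n ≤ 0)]
    rfl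
  | succ m ih =>
    intro n hm
    by_cases h : 0 < n
    · rw [pvD, izbaci_parne_cifre_alt, dif_pos h, dif_neg (by omega : ¬ n ≤ 0)]
      have hlt := pvFloordiv10_lt n h
      have ih' := ih (PySem.Int.floordiv n 10) (by omega)
      rcases PySem.Int.mod_two_eq (PySem.Int.mod n 10) with he | he
      · have h1 : ¬ PySem.Int.mod (PySem.Int.mod n 10) 2 = 1 := by rw [he]; norm_num
        rw [List.filter_cons_of_neg (by simp only [he]; decide), if_neg h1]
        exact ih'
      · have h0 : ¬ PySem.Int.mod (PySem.Int.mod n 10) 2 = 0 := by rw [he]; norm_num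
        rw [List.filter_cons_of_pos (by simp only [he]; decide), if_pos he]
        show PySem.Int.mod n 10 + 10 * pvEval _ = _
        rw [ih']
        ring
    · rw [pvD, izbaci_parne_cifre_alt, dif_neg h, dif_pos (by omega : n ≤ 0)]
      rfl

theorem pvEval_filter_odd (n : Int) :
    pvEval ((pvD n).filter (fun x => !decide (PySem.Int.mod x 2 = 0)))
      = izbaci_parne_cifre_alt n :=
  pvEval_filter_odd_aux n.toNat n (le_refl _)

-- ===== VERDICT (by name: the statement is the Claim_ definition above) =====
theorem izbaci_parne_cifre_spec : Claim_equal_izbaci_parne_cifre := by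
  intro n _
  show izbaci_parne_cifre n = izbaci_parne_cifre_alt n
  unfold izbaci_parne_cifre
  rw [pvDigitsLoop_eq n [] []]
  simp only [List.nil_append]
  rw [pvRemoveAll (fun d => decide (PySem.Int.mod d 2 = 0)) (pvD n)]
  rw [pvFold_eval]
  simpa using pvEval_filter_odd n
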